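-- pv_equiv track=rewrite | github.com/MForofontov/python_utils | iterable_functions/dictionary_operations/dict_value_difference.py | dict_value_difference
-- ===== SOURCE A (Python) =====
-- from typing import Any
--
-- def dict_value_difference(
--     dict1: dict[str, Any],
--     dict2: dict[str, Any],
--     ignore_missing: bool = False
-- ) -> dict[str, Any]:
--     """
--     Calculate the difference between two dictionaries.
--
--     Parameters
--     ----------
--     dict1 : dict[str, Any]
--         The first dictionary (base/original).
--     dict2 : dict[str, Any]
--         The second dictionary (modified/new).
--     ignore_missing : bool, optional
--         If True, ignore keys that are missing in dict2 (by default False).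
--
--     Returns
--     -------
--     dict[str, Any]
--         A dictionary containing only the keys that have different values
--         between dict1 and dict2, with values from dict2.
--
--     Raises
--     ------
--     TypeError
--         If parameters are of wrong type.
--
--     Examples
--     --------
--     >>> dict1 = {'a': 1, 'b': 2, 'c': 3}
--     >>> dict2 = {'a': 1, 'b': 5, 'd': 4}
--     >>> dict_value_difference(dict1, dict2)
--     {'b': 5, 'd': 4}
--     >>> dict_value_difference(dict1, dict2, ignore_missing=True)
--     {'b': 5}
--
--     Notes
--     -----
--     This function performs a shallow comparison of dictionary values.
--     For nested dictionaries, use dict_structural_difference for more detailed analysis.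
--
--     Complexity
--     ----------
--     Time: O(n), Space: O(k) where n is the total keys and k is different keys
--     """
--     # Input validation
--     if not isinstance(dict1, dict):
--         raise TypeError(f"dict1 must be a dictionary, got {type(dict1).__name__}")
--     if not isinstance(dict2, dict):
--         raise TypeError(f"dict2 must be a dictionary, got {type(dict2).__name__}")
--     if not isinstance(ignore_missing, bool):
--         raise TypeError(f"ignore_missing must be a boolean, got {type(ignore_missing).__name__}")
--
--     differences = {}
--
--     # Check all keys in dict2
--     for key, value in dict2.items():
--         if key not in dict1:
--             # New key in dict2
--             if not ignore_missing:
--                 differences[key] = value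
--         elif dict1[key] != value:
--             # Key exists in both but values are different
--             differences[key] = value
--
--     # Check for keys that exist in dict1 but not in dict2
--     if not ignore_missing:
--         for key in dict1:
--             if key not in dict2:
--                 # Key was removed in dict2, mark with None
--                 differences[key] = None
--
--     return differences
-- ===== SOURCE B (Python) =====
-- _MISSING = object()  # sentinel: distinct from every stored value
--
--
-- def dict_value_difference(dict1, dict2, ignore_missing=False):
--     if not isinstance(dict1, dict):
--         raise TypeError(f"dict1 must be a dictionary, got {type(dict1).__name__}")
--     if not isinstance(dict2, dict):
--         raise TypeError(f"dict2 must be a dictionary, got {type(dict2).__name__}")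
--     if not isinstance(ignore_missing, bool):
--         raise TypeError(f"ignore_missing must be a boolean, got {type(ignore_missing).__name__}")
--
--     # One uniform pass over a single merged key sequence ({**dict2, **dict1}:
--     # dict2's keys in order, then dict1's extra keys), classifying every key by
--     # one comparison of its two sentinel-lookups instead of A's two asymmetric
--     # loops with per-case branching; pairs are collected in a list and turned
--     # into a dict once at the end.
--     scan = dict2 if ignore_missing else {**dict2, **dict1}
--     out = []
--     for key in scan:
--         v1 = dict1.get(key, _MISSING)
--         v2 = dict2.get(key, _MISSING)
--         if v1 is _MISSING and ignore_missing:
--             continue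
--         if v1 is _MISSING or v2 is _MISSING or v1 != v2:
--             out.append((key, None if v2 is _MISSING else v2))
--     return dict(out)
-- ===== Notes on version B (the rewrite author's own statement) =====
-- stated objective: alternative
-- what changed: A classifies keys in two asymmetric loops (dict2 items with new-key/changed-value branches, then dict1 keys missing from dict2) inserting into a dict as it goes; B builds one merged key sequence ({**dict2, **dict1}, or dict2 alone when ignore_missing), classifies every key by a single uniform comparison of its two sentinel lookups, collects (key, value) pairs in a list and builds the dict once at the end.
import Mathlib
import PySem

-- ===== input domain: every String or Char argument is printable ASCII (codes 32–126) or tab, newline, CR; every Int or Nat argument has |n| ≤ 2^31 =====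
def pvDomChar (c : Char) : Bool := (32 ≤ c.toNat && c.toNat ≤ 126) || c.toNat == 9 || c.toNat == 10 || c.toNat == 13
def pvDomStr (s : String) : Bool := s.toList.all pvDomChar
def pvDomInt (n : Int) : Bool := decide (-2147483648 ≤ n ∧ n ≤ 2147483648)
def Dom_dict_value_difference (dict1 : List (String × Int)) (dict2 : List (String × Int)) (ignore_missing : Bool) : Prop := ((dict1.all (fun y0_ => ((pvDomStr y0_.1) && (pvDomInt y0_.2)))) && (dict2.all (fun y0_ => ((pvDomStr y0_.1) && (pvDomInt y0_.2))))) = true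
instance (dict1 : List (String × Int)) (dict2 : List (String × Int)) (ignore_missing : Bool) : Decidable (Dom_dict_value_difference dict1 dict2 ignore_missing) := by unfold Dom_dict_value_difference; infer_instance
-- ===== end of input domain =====

-- B replaces A's two asymmetric classification loops by one uniform pass over the merged
-- key sequence {**dict2, **dict1}, one sentinel-lookup comparison per key, and a pair list
-- turned into a dict once at the end (objective: alternative).

-- ===== PORT A =====
-- The association-list arguments denote Python dicts: both ports first build the dict
-- (Dict.ofList = Python dict construction: first position, last value wins).
def dict_value_difference (dict1 : List (String × Int)) (dict2 : List (String × Int)) (ignore_missing : Bool) : List (String × Option Int) :=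
  let d1 : PySem.Dict String Int := PySem.Dict.ofList dict1
  let d2 : PySem.Dict String Int := PySem.Dict.ofList dict2
  -- for key, value in dict2.items(): …
  let diffs : PySem.Dict String (Option Int) :=
    d2.items.foldl (fun acc kv =>
      if !(d1.contains kv.1) then
        (if !ignore_missing then acc.insert kv.1 (some kv.2) else acc)
      else if d1.getD kv.1 0 ≠ kv.2 then  -- key is present in this branch, so getD _ 0 = dict1[key]
        acc.insert kv.1 (some kv.2)
      else acc) PySem.Dict.empty
  -- if not ignore_missing: for key in dict1: …
  let diffs :=
    if !ignore_missing then
      d1.keys.foldl (fun acc key =>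
        if !(d2.contains key) then acc.insert key none else acc) diffs
    else diffs
  diffs.items

-- ===== PORT B =====
-- scan = dict2 if ignore_missing else {**dict2, **dict1}: the merge ports as
-- d2.update d1.items (dict2's keys keep their position, dict1's new keys append);
-- only its key sequence is used.  dict1.get(key, _MISSING) ports as d1.get? key
-- (none = the sentinel); the appended value 'None if v2 is _MISSING else v2' is
-- exactly d2.get? key.  dict(out) at the end ports as (Dict.ofList out).items.
def dict_value_difference_alt (dict1 : List (String × Int)) (dict2 : List (String × Int)) (ignore_missing : Bool) : List (String × Option Int) :=
  let d1 : PySem.Dict String Int := PySem.Dict.ofList dict1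
  let d2 : PySem.Dict String Int := PySem.Dict.ofList dict2
  let scan : List String := if ignore_missing then d2.keys else (d2.update d1.items).keys
  let out : List (String × Option Int) :=
    scan.foldl (fun out key =>
      let v1 := d1.get? key
      let v2 := d2.get? key
      if v1 == none && ignore_missing then out
      else if v1 == none || v2 == none || v1 != v2 then out ++ [(key, v2)]
      else out) []
  (PySem.Dict.ofList out).items

-- ===== PRECONDITION & SPEC =====
def Spec_dict_value_difference (dict1 : List (String × Int)) (dict2 : List (String × Int)) (ignore_missing : Bool) (out : List (String × Option Int)) : Prop := out = dict_value_difference_alt dict1 dict2 ignore_missing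
instance (dict1 : List (String × Int)) (dict2 : List (String × Int)) (ignore_missing : Bool) (out : List (String × Option Int)) : Decidable (Spec_dict_value_difference dict1 dict2 ignore_missing out) := by unfold Spec_dict_value_difference; infer_instance

-- ===== CLAIM (what is proved, stated in full; the proofs are below) =====
def Claim_equal_dict_value_difference : Prop := ∀ (dict1 : List (String × Int)) (dict2 : List (String × Int)) (ignore_missing : Bool), Dom_dict_value_difference dict1 dict2 ignore_missing → Spec_dict_value_difference dict1 dict2 ignore_missing (dict_value_difference dict1 dict2 ignore_missing)

-- ===== LEMMAS AND PROOFS =====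

-- A fold that conditionally inserts distinct keys, fresh whenever the condition holds,
-- appends exactly the selected items (used for A's two loops).
theorem items_foldl_insert_if {α : Type} (k : α → String) (v : α → Option Int) (f : α → Bool)
    (l : List α) (d : PySem.Dict String (Option Int))
    (hn : (l.map k).Nodup) (hf : ∀ a ∈ l, f a = true → d.contains (k a) = false) :
    (l.foldl (fun d a => if f a then d.insert (k a) (v a) else d) d).items
      = d.items ++ (l.filter f).map (fun a => (k a, v a)) := by
  induction l generalizing d with
  | nil => simp
  | cons a l ih =>
    simp only [List.map_cons, List.nodup_cons] at hn
    by_cases hfa : f a = true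
    · have hins : (d.insert (k a) (v a)).items = d.items ++ [(k a, v a)] :=
        PySem.Dict.items_insert_of_not_contains d (v a) (hf a (by simp) hfa)
      have hrec := ih (d.insert (k a) (v a)) hn.2 (by
        intro b hb hfb
        rw [PySem.Dict.contains_insert]
        have hne : (k b == k a) = false := by
          simp only [beq_eq_false_iff_ne, ne_eq]
          intro h; exact hn.1 (h ▸ (List.mem_map_of_mem hb))
        simp [hne, hf b (List.mem_cons_of_mem _ hb) hfb])
      simp [List.foldl_cons, hfa, hrec, hins]
    · have hfa' : f a = false := by simpa using hfa
      have hrec := ih d hn.2 (fun b hb hfb => hf b (List.mem_cons_of_mem _ hb) hfb)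
      simp [List.foldl_cons, hfa', hrec]

-- Dict.contains as a decidable key-list membership.
theorem contains_eq_decide (d : PySem.Dict String Int) (s : String) :
    d.contains s = decide (s ∈ d.keys) := PySem.Dict.contains_eq_decide_mem_keys d s

-- get? as contains + getD: dict1[k] != v, tested under "k in dict1", equals get? ≠ some v.
theorem cond_eq (d1 : PySem.Dict String Int) (kv : String × Int) (b : Bool) :
    (if !(d1.contains kv.1) then b else decide (d1.getD kv.1 0 ≠ kv.2))
      = (if b then !(d1.contains kv.1) || decide (d1.get? kv.1 ≠ some kv.2)
         else d1.contains kv.1 && decide (d1.get? kv.1 ≠ some kv.2)) := by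
  cases hc : d1.contains kv.1
  · cases b <;> simp
  · have hs : (d1.get? kv.1).isSome = true := by
      rw [← PySem.Dict.contains_eq_isSome_get?]; exact hc
    rcases Option.isSome_iff_exists.mp hs with ⟨w, hw⟩
    have hg : d1.getD kv.1 0 = w := by rw [PySem.Dict.getD_eq_get?_getD, hw]; rfl
    cases b <;> simp [hg, hw]

-- The selected dict2 keys, mapped back through get?, are the selected dict2 items.
theorem filter_map_keys_eq (d2 : PySem.Dict String Int) (c : String → Bool)
    (l : List (String × Int)) (h : ∀ kv ∈ l, d2.get? kv.1 = some kv.2) :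
    ((l.map Prod.fst).filter c).map (fun k => (k, d2.get? k))
      = (l.filter (fun kv => c kv.1)).map (fun kv => (kv.1, some kv.2)) := by
  induction l with
  | nil => simp
  | cons kv l ih =>
    have hkv := h kv (by simp)
    have hrec := ih (fun p hp => h p (List.mem_cons_of_mem _ hp))
    by_cases hc : c kv.1 = true
    · simp [hc, hrec, hkv]
    · have hc' : c kv.1 = false := by simpa using hc
      simp [hc', hrec]

theorem dict_value_difference_eq (dict1 : List (String × Int)) (dict2 : List (String × Int)) (ignore_missing : Bool) :
    dict_value_difference dict1 dict2 ignore_missing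
      = dict_value_difference_alt dict1 dict2 ignore_missing := by
  unfold dict_value_difference dict_value_difference_alt
  have hnd1 : (PySem.Dict.ofList dict1).keys.Nodup := PySem.Dict.nodup_keys_ofList dict1
  have hnd2 : (PySem.Dict.ofList dict2).keys.Nodup := PySem.Dict.nodup_keys_ofList dict2
  generalize h1 : PySem.Dict.ofList dict1 = d1 at hnd1 ⊢
  generalize h2 : PySem.Dict.ofList dict2 = d2 at hnd2 ⊢
  clear h1 h2
  have hkeys2 : (d2.items.map Prod.fst).Nodup := hnd2
  have hget2 : ∀ kv ∈ d2.items, d2.get? kv.1 = some kv.2 := by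
    intro kv hkv
    exact PySem.Dict.get?_of_mem_items d2 (by exact hkv) hnd2
  -- ---- A's side: normalise the first loop's body, then compute both loops as appends ----
  have hbody : (fun (acc : PySem.Dict String (Option Int)) (kv : String × Int) =>
      if !(d1.contains kv.1) then
        (if !ignore_missing then acc.insert kv.1 (some kv.2) else acc)
      else if d1.getD kv.1 0 ≠ kv.2 then acc.insert kv.1 (some kv.2) else acc)
      = (fun acc kv =>
          if (if !(d1.contains kv.1) then !ignore_missing else decide (d1.getD kv.1 0 ≠ kv.2))
          then acc.insert kv.1 (some kv.2) else acc) := by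
    funext acc kv
    split_ifs <;> simp_all
  simp only [hbody]
  -- ---- B's side: normalise the loop body to "if C key then append else skip" ----
  have hBbody : (fun (out : List (String × Option Int)) (key : String) =>
      let v1 := d1.get? key
      let v2 := d2.get? key
      if v1 == none && ignore_missing then out
      else if v1 == none || v2 == none || v1 != v2 then out ++ [(key, v2)]
      else out)
      = (fun out key =>
          if (!(d1.get? key == none && ignore_missing) &&
              ((d1.get? key == none || d2.get? key == none) || d1.get? key != d2.get? key))
          then out ++ [(key, d2.get? key)] else out) := by
    funext out key
    cases h1 : (d1.get? key == none) <;> cases hig : ignore_missing <;>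
      cases hb : (d2.get? key == none) <;> simp [h1, hig, hb]
  simp only [hBbody, PySem.List.foldl_append_if, List.nil_append]
  -- B's per-key test, abbreviated
  set C : String → Bool := fun key =>
    (!(d1.get? key == none && ignore_missing) &&
      ((d1.get? key == none || d2.get? key == none) || d1.get? key != d2.get? key)) with hC
  -- on a key of dict2 the test is "(present if ignore_missing) and changed"
  have hCkey2 : ∀ kv ∈ d2.items, C kv.1
      = ((!ignore_missing || d1.contains kv.1) && decide (d1.get? kv.1 ≠ some kv.2)) := by
    intro kv hkv
    have hv2 : d2.get? kv.1 = some kv.2 := hget2 kv hkv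
    rw [hC]
    simp only [hv2, PySem.Dict.contains_eq_isSome_get?]
    cases hg : d1.get? kv.1 with
    | none => cases ignore_missing <;> simp
    | some w => cases ignore_missing <;> simp [bne, Bool.beq_eq_decide_eq]
  -- the filtered dict2 keys, as items
  have hkeyfilter : (d2.keys.filter C).map (fun k => (k, d2.get? k))
      = (d2.items.filter (fun kv =>
          (!ignore_missing || d1.contains kv.1) && decide (d1.get? kv.1 ≠ some kv.2))).map
          (fun kv => (kv.1, some kv.2)) := by
    show ((d2.items.map Prod.fst).filter C).map (fun k => (k, d2.get? k)) = _
    rw [filter_map_keys_eq d2 C d2.items hget2]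
    congr 1
    exact List.filter_congr (fun kv hkv => hCkey2 kv hkv)
  have hnodupC : ∀ (scan : List String), scan.Nodup →
      (((scan.filter C).map (fun k => (k, d2.get? k))).map Prod.fst).Nodup := by
    intro scan hnd
    have hmm : ((scan.filter C).map (fun k => (k, d2.get? k))).map Prod.fst
        = scan.filter C := by simp [List.map_map, Function.comp_def]
    rw [hmm]
    exact List.filter_sublist.nodup hnd
  -- nodup of the selected pair keys (needed for dict(out) = out)
  have hfreshitems : ∀ (out : List (String × Option Int)), (out.map Prod.fst).Nodup →
      (PySem.Dict.ofList out).items = out := by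
    intro out hnd
    show ((PySem.Dict.empty : PySem.Dict String (Option Int)).update out).items = out
    unfold PySem.Dict.update
    rw [PySem.Dict.items_foldl_insert_fresh out Prod.fst Prod.snd PySem.Dict.empty
        (fun a _ => PySem.Dict.contains_empty a.1) hnd]
    simp [show (PySem.Dict.empty : PySem.Dict String (Option Int)).items = [] from rfl]
  have hempty : (PySem.Dict.empty : PySem.Dict String (Option Int)).items = [] := rfl
  cases ignore_missing with
  | true =>
    -- A: one conditional-insert loop; B: filter over dict2's keys
    simp only [Bool.not_true, if_true, if_false, Bool.false_eq_true, cond_eq d1 _ false]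
    rw [items_foldl_insert_if (fun kv => kv.1) (fun kv => some kv.2) _ d2.items
        PySem.Dict.empty hkeys2 (by intro a _ _; rfl)]
    rw [hfreshitems _ (hnodupC d2.keys hnd2), hkeyfilter, hempty, List.nil_append]
    congr 1
  | false =>
    simp only [Bool.not_false, if_true, cond_eq d1 _ true]
    -- the per-item condition reduces to the sentinel-get test
    have hC' : ∀ (s : String) (v : Int),
        (!(d1.contains s) || decide (d1.get? s ≠ some v)) = decide (d1.get? s ≠ some v) := by
      intro s v
      cases hc : d1.contains s
      · have : d1.get? s = none := by
          refine (PySem.Dict.get?_eq_none_iff_not_mem_keys d1 s).mpr ?_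
          intro hmem
          rw [(PySem.Dict.contains_iff_mem_keys d1 s).mpr hmem] at hc
          simp at hc
        simp [this]
      · simp
    simp only [hC', Bool.false_eq_true, if_false]
    -- A's first loop: appends the changed/new items
    set acc1 := d2.items.foldl
      (fun acc kv => if decide (d1.get? kv.1 ≠ some kv.2) then acc.insert kv.1 (some kv.2) else acc)
      PySem.Dict.empty with hacc1
    have hacc1items : acc1.items = (d2.items.filter
        (fun kv => decide (d1.get? kv.1 ≠ some kv.2))).map (fun kv => (kv.1, some kv.2)) := by
      rw [hacc1, items_foldl_insert_if (fun kv => kv.1) (fun kv => some kv.2)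
        (fun kv => decide (d1.get? kv.1 ≠ some kv.2)) d2.items PySem.Dict.empty hkeys2
        (fun _ _ _ => rfl), hempty, List.nil_append]
    have hacc1keys : ∀ s ∈ acc1.keys, s ∈ d2.keys := by
      intro s hs
      have : s ∈ acc1.items.map Prod.fst := hs
      rw [hacc1items, List.map_map, List.mem_map] at this
      rcases this with ⟨kv, hkv, hkv1⟩
      exact hkv1 ▸ List.mem_map_of_mem (List.mem_of_mem_filter hkv)
    -- A's second loop: appends the removed keys
    have hfold2 := items_foldl_insert_if (fun s => s) (fun _ => (none : Option Int))
        (fun s => !(d2.contains s)) d1.keys acc1 (by simpa using hnd1)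
        (by
          intro s _ hfs
          have hfs' : d2.contains s = false := by simpa using hfs
          have hs2 : s ∉ d2.keys := fun hmem => by
            simp [(PySem.Dict.contains_iff_mem_keys d2 s).mpr hmem] at hfs'
          cases hc : acc1.contains s
          · rfl
          · exact absurd (hacc1keys s ((PySem.Dict.contains_iff_mem_keys acc1 s).mp hc)) hs2)
    beta_reduce at hfold2
    rw [hfold2, hacc1items]
    -- B's merged key sequence is dict2's keys followed by the removed keys
    have hscan : (d2.update d1.items).keys
        = d2.keys ++ d1.keys.filter (fun k => !(d2.contains k)) := by
      show (d1.items.foldl (fun acc p => acc.insert p.1 p.2) d2).keys = _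
      rw [PySem.Dict.keys_foldl_insert_key d1.items Prod.fst (fun _ x => x.2) d2]
      have hk1 : d1.items.map Prod.fst = d1.keys := rfl
      rw [hk1, PySem.Set.update_eq_append_filter d2.keys d1.keys,
          PySem.Set.ofList_eq_self_of_nodup d1.keys hnd1]
      congr 1
      refine List.filter_congr (fun k _ => ?_)
      have : PySem.Set.contains d2.keys k = d2.contains k := by
        rw [contains_eq_decide]
        simp [PySem.Set.contains]
      rw [this]
    have hnodscan : (d2.keys ++ d1.keys.filter (fun k => !(d2.contains k))).Nodup := by
      rw [← hscan]
      exact PySem.Dict.nodup_keys_update d2 d1.items hnd2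
    rw [hscan, List.filter_append, List.map_append,
        hfreshitems _ (by rw [← List.map_append, ← List.filter_append]
                          exact hnodupC _ hnodscan)]
    congr 1
    · rw [hkeyfilter]
      congr 1
    · -- every removed key passes B's test and maps to (key, none)
      have hkeep : (d1.keys.filter (fun k => !(d2.contains k))).filter C
          = d1.keys.filter (fun k => !(d2.contains k)) := by
        refine List.filter_eq_self.mpr (fun k hk => ?_)
        have hk2 : d2.contains k = false := by
          have := List.of_mem_filter hk
          simpa using this
        have hv2 : d2.get? k = none := by
          refine (PySem.Dict.get?_eq_none_iff_not_mem_keys d2 k).mpr (fun hmem => ?_)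
          simp [(PySem.Dict.contains_iff_mem_keys d2 k).mpr hmem] at hk2
        simp [hC, hv2]
      rw [hkeep]
      refine List.map_congr_left (fun k hk => ?_)
      have hk2 : d2.contains k = false := by
        have := List.of_mem_filter hk
        simpa using this
      have hv2 : d2.get? k = none := by
        refine (PySem.Dict.get?_eq_none_iff_not_mem_keys d2 k).mpr (fun hmem => ?_)
        simp [(PySem.Dict.contains_iff_mem_keys d2 k).mpr hmem] at hk2
      rw [hv2]

-- ===== VERDICT (by name: the statement is the Claim_ definition above) =====
theorem dict_value_difference_spec : Claim_equal_dict_value_difference := by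
  intro dict1 dict2 ig _
  unfold Spec_dict_value_difference
  exact dict_value_difference_eq dict1 dict2 ig
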